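-- pv_equiv track=rewrite | github.com/Scre4my/Python-Skillbox | skillBox/mod2/task11.py | has_duplicate_digits
-- ===== SOURCE A (Python) =====
-- def has_duplicate_digits(sequence):
--     seen = set()
--     for num in sequence:
--         while num > 0:
--             digit = num % 10
--             if digit in seen:
--                 return True
--             seen.add(digit)
--             num //= 10
--     return False
-- ===== SOURCE B (Python) =====
-- def has_duplicate_digits(sequence):
--     digits = "".join(str(num) for num in sequence if num > 0)
--     return len(set(digits)) != len(digits)
-- ===== Notes on version B (the rewrite author's own statement) =====
-- stated objective: simpler
-- what changed: Replaces the nested loop with arithmetic digit extraction and incremental seen-set membership plus early return by joining the decimal string forms of the positive numbers and comparing len(set(digits)) with len(digits).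
import Mathlib
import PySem

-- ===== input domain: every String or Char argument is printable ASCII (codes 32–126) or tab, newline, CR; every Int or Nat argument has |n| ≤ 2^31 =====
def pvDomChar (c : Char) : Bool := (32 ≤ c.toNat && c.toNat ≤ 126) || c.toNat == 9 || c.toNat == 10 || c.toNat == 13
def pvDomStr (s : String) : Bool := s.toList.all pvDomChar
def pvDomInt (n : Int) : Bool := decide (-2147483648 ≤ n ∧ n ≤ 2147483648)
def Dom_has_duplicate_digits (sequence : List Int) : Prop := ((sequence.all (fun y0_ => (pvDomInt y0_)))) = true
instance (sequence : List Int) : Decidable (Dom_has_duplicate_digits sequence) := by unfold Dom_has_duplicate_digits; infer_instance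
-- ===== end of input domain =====

-- B replaces A's arithmetic digit extraction with an incremental seen set and early return
-- by joining the decimal strings of the positive numbers and a single len(set) vs len comparison.

-- ===== PORT A =====
-- termination fact for the 'while num > 0: ... num //= 10' loop
theorem pvFloordivTen_lt (num : Int) (h : 0 < num) :
    (PySem.Int.floordiv num 10 ).toNat < num.toNat := by
  rw [PySem.Int.floordiv_eq_ediv_of_pos (by norm_num)]
  have h2 : 0 ≤ num / 10 := Int.ediv_nonneg (le_of_lt h) (by norm_num)
  have h1 : num / 10 < num := by omega
  omega

-- inner 'while num > 0' loop: returns (early-return flag, seen)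
def aLoopNum (num : Int) (seen : PySem.Set Int) : Bool × PySem.Set Int :=
  if h : 0 < num then
    let digit := PySem.Int.mod num 10
    if PySem.Set.contains seen digit then (true, seen)
    else aLoopNum (PySem.Int.floordiv num 10) (PySem.Set.add seen digit)
  else (false, seen)
termination_by num.toNat
decreasing_by exact pvFloordivTen_lt num h

-- outer 'for num in sequence' loop with the early return threaded through
def aLoopSeq : List Int → PySem.Set Int → Bool
  | [], _ => false
  | num :: rest, seen =>
    match aLoopNum num seen with
    | (true, _) => true
    | (false, seen') => aLoopSeq rest seen'

def has_duplicate_digits (sequence : List Int) : Bool :=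
  aLoopSeq sequence PySem.Set.empty

-- ===== PORT B =====
def has_duplicate_digits_alt (sequence : List Int) : Bool :=
  let digits : List Char :=
    (sequence.filter (fun num => decide (0 < num))).flatMap (fun num => PySem.Int.toChars num)
  decide ((PySem.Set.ofList digits).length ≠ digits.length)

-- ===== PRECONDITION & SPEC =====
def Spec_has_duplicate_digits (sequence : List Int) (out : Bool) : Prop := out = has_duplicate_digits_alt sequence
instance (sequence : List Int) (out : Bool) : Decidable (Spec_has_duplicate_digits sequence out) := by unfold Spec_has_duplicate_digits; infer_instance

-- ===== CLAIM (what is proved, stated in full; the proofs are below) =====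
def Claim_equal_has_duplicate_digits : Prop := ∀ (sequence : List Int), Dom_has_duplicate_digits sequence → Spec_has_duplicate_digits sequence (has_duplicate_digits sequence)

-- ===== LEMMAS AND PROOFS =====

-- the digit list (least significant first) A's inner loop walks through
def digitsPos (num : Int) : List Int :=
  if h : 0 < num then PySem.Int.mod num 10 :: digitsPos (PySem.Int.floordiv num 10) else []
termination_by num.toNat
decreasing_by exact pvFloordivTen_lt num h

-- linear duplicate scan over a flat digit list
def dupScan : List Int → PySem.Set Int → Bool × PySem.Set Int
  | [], s => (false, s)
  | d :: ds, s => if PySem.Set.contains s d then (true, s) else dupScan ds (PySem.Set.add s d)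

theorem aLoopNum_eq_dupScan (num : Int) (seen : PySem.Set Int) :
    aLoopNum num seen = dupScan (digitsPos num) seen := by
  fun_induction aLoopNum num seen with
  | case1 num seen h digit hc =>
    rw [digitsPos, dif_pos h, dupScan, if_pos hc]
  | case2 num seen h digit hc ih =>
    rw [digitsPos, dif_pos h, dupScan, if_neg hc]; exact ih
  | case3 num seen h =>
    rw [digitsPos, dif_neg h, dupScan]

theorem dupScan_append (l1 l2 : List Int) (s : PySem.Set Int) :
    dupScan (l1 ++ l2) s =
      match dupScan l1 s with
      | (true, s') => (true, s')
      | (false, s') => dupScan l2 s' := by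
  induction l1 generalizing s with
  | nil => simp [dupScan]
  | cons d ds ih =>
    simp only [List.cons_append, dupScan]
    split_ifs with hc
    · rfl
    · exact ih _

theorem aLoopSeq_eq (seq : List Int) (seen : PySem.Set Int) :
    aLoopSeq seq seen = (dupScan (seq.flatMap digitsPos) seen).1 := by
  induction seq generalizing seen with
  | nil => simp [aLoopSeq, dupScan]
  | cons n rest ih =>
    rw [aLoopSeq, aLoopNum_eq_dupScan, List.flatMap_cons, dupScan_append]
    rcases h : dupScan (digitsPos n) seen with ⟨b, s'⟩
    cases b <;> simp [ih]

theorem dupScan_true_iff (l : List Int) (s : PySem.Set Int) :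
    (dupScan l s).1 = true ↔ ¬ l.Nodup ∨ ∃ x ∈ l, x ∈ s := by
  induction l generalizing s with
  | nil => simp [dupScan]
  | cons d ds ih =>
    rw [dupScan]
    split_ifs with hc
    · rw [PySem.Set.contains_iff] at hc
      simp only [List.nodup_cons, List.mem_cons]
      constructor
      · intro _; right; exact ⟨d, Or.inl rfl, hc⟩
      · intro _; trivial
    · rw [PySem.Set.contains_iff] at hc
      rw [ih]
      simp only [List.nodup_cons, List.mem_cons, PySem.Set.mem_add]
      constructor
      · rintro (h | ⟨x, hx, (hxs | rfl)⟩)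
        · exact Or.inl (fun h' => h h'.2)
        · exact Or.inr ⟨x, Or.inr hx, hxs⟩
        · exact Or.inl (fun h' => h'.1 hx)
      · rintro (h | ⟨x, (rfl | hx), hxs⟩)
        · by_cases hd : d ∈ ds
          · exact Or.inr ⟨d, hd, Or.inr rfl⟩
          · exact Or.inl (fun hn => h ⟨hd, hn⟩)
        · exact absurd hxs hc
        · exact Or.inr ⟨x, hx, Or.inl hxs⟩

-- A = true iff the flat digit list has a repeat
theorem hddA_iff (seq : List Int) :
    has_duplicate_digits seq = true ↔ ¬ (seq.flatMap digitsPos).Nodup := by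
  rw [has_duplicate_digits, aLoopSeq_eq, dupScan_true_iff]
  simp [PySem.Set.empty]

theorem len_foldl_add_le {α : Type} [BEq α] [LawfulBEq α] (l : List α) : ∀ (s : List α),
    (l.foldl PySem.Set.add s).length ≤ s.length + l.length := by
  induction l with
  | nil => simp
  | cons x t ih =>
    intro s
    rw [List.foldl_cons, PySem.Set.add_eq_ite]
    split_ifs with hm
    · have := ih s; simp only [List.length_cons]; omega
    · have := ih (s ++ [x]); simp [List.length_append] at this ⊢; omega

theorem len_foldl_add_lt {α : Type} [BEq α] [LawfulBEq α] (l : List α) : ∀ (s : List α),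
    (¬ l.Nodup ∨ ∃ x ∈ l, x ∈ s) → (l.foldl PySem.Set.add s).length < s.length + l.length := by
  induction l with
  | nil => rintro s (h | ⟨x, hx, _⟩) <;> simp_all
  | cons x t ih =>
    intro s hcase
    rw [List.foldl_cons]
    by_cases hm : x ∈ s
    · rw [PySem.Set.add_of_mem hm]
      have := len_foldl_add_le t s
      simp only [List.length_cons]
      omega
    · rw [PySem.Set.add_of_not_mem hm]
      have hstep : (t.foldl PySem.Set.add (s ++ [x])).length < (s ++ [x]).length + t.length := by
        apply ih
        rcases hcase with h | ⟨y, hy, hys⟩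
        · rw [List.nodup_cons] at h
          by_cases hxt : x ∈ t
          · exact Or.inr ⟨x, hxt, by simp⟩
          · exact Or.inl (fun h' => h ⟨hxt, h'⟩)
        · rcases List.mem_cons.mp hy with rfl | hyt
          · exact absurd hys hm
          · exact Or.inr ⟨y, hyt, by simp [hys]⟩
      simp [List.length_append] at hstep ⊢
      omega

-- ofList length vs length characterises Nodup
theorem ofList_length_eq_iff {α : Type} [BEq α] [LawfulBEq α] (l : List α) :
    (PySem.Set.ofList l).length = l.length ↔ l.Nodup := by
  constructor
  · intro hlen
    by_contra hnd
    have := len_foldl_add_lt l [] (Or.inl hnd)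
    rw [PySem.Set.ofList_eq_foldl] at hlen
    simp at this
    omega
  · intro hnd
    rw [PySem.Set.ofList_eq_self_of_nodup l hnd]


-- Nat.toDigitsCore in terms of Nat.digits
theorem toDigitsCore_eq_digits (f : Nat) : ∀ (n : Nat) (acc : List Char), 0 < n → n ≤ f →
    Nat.toDigitsCore 10 (f + 1) n acc = ((Nat.digits 10 n).map Nat.digitChar).reverse ++ acc := by
  induction f with
  | zero => intro n acc h1 h2; omega
  | succ f ih =>
    intro n acc h1 h2
    rw [Nat.toDigitsCore]
    by_cases hr : n / 10 = 0
    · rw [if_pos hr, Nat.digits_def' (by norm_num) h1, hr, Nat.digits_zero]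
      simp
    · rw [if_neg hr]
      have hlt := Nat.div_lt_self h1 (by norm_num : 1 < 10)
      rw [ih (n / 10) _ (Nat.pos_of_ne_zero hr) (by omega),
        Nat.digits_def' (by norm_num) h1]
      simp

theorem digitsPos_natCast (m : Nat) :
    digitsPos (m : Int) = (Nat.digits 10 m).map (fun d => Int.ofNat d) := by
  induction m using Nat.strong_induction_on with
  | _ m ih =>
    by_cases h : 0 < m
    · rw [digitsPos, dif_pos (by exact_mod_cast h)]
      have h10 : (10 : Int) = ((10 : Nat) : Int) := by norm_num
      rw [h10, PySem.Int.mod_natCast, PySem.Int.floordiv_natCast,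
        ih (m / 10) (Nat.div_lt_self h (by norm_num)),
        Nat.digits_def' (by norm_num) h]
      simp
    · have hm : m = 0 := by omega
      subst hm
      rw [digitsPos, dif_neg (by norm_num)]
      simp

theorem digitsPos_eq (n : Int) (h : 0 < n) :
    digitsPos n = (Nat.digits 10 n.toNat).map (fun d => Int.ofNat d) := by
  rw [← Int.toNat_of_nonneg (le_of_lt h)]
  exact digitsPos_natCast n.toNat


theorem toChars_eq (n : Int) (h : 0 < n) :
    PySem.Int.toChars n = ((digitsPos n).map (fun d : Int => Nat.digitChar d.toNat)).reverse := by
  rw [PySem.Int.toChars, if_neg (by omega), Nat.toDigits,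
    toDigitsCore_eq_digits n.toNat n.toNat [] (by omega) le_rfl,
    digitsPos_eq n h, List.map_map, List.append_nil]
  simp [Function.comp]


theorem digitsPos_mem_bound (n d : Int) (h : d ∈ digitsPos n) : 0 ≤ d ∧ d < 10 := by
  fun_induction digitsPos n with
  | case1 n hn ih =>
    rcases List.mem_cons.mp h with rfl | hmem
    · exact ⟨PySem.Int.mod_nonneg n (by norm_num), PySem.Int.mod_lt n (by norm_num)⟩
    · exact ih hmem
  | case2 n hn => simp at h

theorem flatMap_digitsPos_filter (seq : List Int) :
    (seq.filter (fun n => decide (0 < n))).flatMap digitsPos = seq.flatMap digitsPos := by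
  induction seq with
  | nil => rfl
  | cons n rest ih =>
    by_cases h : 0 < n
    · simp only [List.filter_cons, h, decide_true, if_true, List.flatMap_cons, ih]
    · simp only [List.filter_cons, h, decide_false, Bool.false_eq_true, if_false, ih]
      rw [List.flatMap_cons, digitsPos, dif_neg h, List.nil_append]

theorem forall₂_perm_map {α β : Type} (g1 g2 : α → List β) (h : ∀ a, (g1 a).Perm (g2 a)) :
    ∀ L : List α, List.Forall₂ List.Perm (L.map g1) (L.map g2)
  | [] => List.Forall₂.nil
  | a :: t => List.Forall₂.cons (h a) (forall₂_perm_map g1 g2 h t)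

theorem digitChar_inj_lt (a b : Nat) (ha : a < 10) (hb : b < 10)
    (h : Nat.digitChar a = Nat.digitChar b) : a = b := by
  interval_cases a <;> interval_cases b <;> simp_all [Nat.digitChar]

theorem hddB_iff (seq : List Int) :
    has_duplicate_digits_alt seq = true ↔ ¬ (seq.flatMap digitsPos).Nodup := by
  rw [has_duplicate_digits_alt]
  simp only [decide_eq_true_eq]
  rw [Ne, ofList_length_eq_iff]
  apply not_congr
  have hC : (seq.filter (fun n => decide (0 < n))).flatMap (fun num => PySem.Int.toChars num) =
      (seq.filter (fun n => decide (0 < n))).flatMap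
        (fun n => ((digitsPos n).map (fun d : Int => Nat.digitChar d.toNat)).reverse) := by
    rw [List.flatMap_def, List.flatMap_def]
    congr 1
    apply List.map_congr_left
    intro n hn
    exact toChars_eq n (by simpa using (List.mem_filter.mp hn).2)
  rw [hC]
  have hperm : ((seq.filter (fun n => decide (0 < n))).flatMap
        (fun n => ((digitsPos n).map (fun d : Int => Nat.digitChar d.toNat)).reverse)).Perm
      ((seq.filter (fun n => decide (0 < n))).flatMap
        (fun n => (digitsPos n).map (fun d : Int => Nat.digitChar d.toNat))) := by
    rw [List.flatMap_def, List.flatMap_def]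
    exact List.Perm.flatten_congr
      (forall₂_perm_map _ _ (fun a => List.reverse_perm _) _)
  rw [hperm.nodup_iff, ← List.map_flatMap, flatMap_digitsPos_filter]
  constructor
  · exact List.Nodup.of_map _
  · intro hnd
    apply hnd.map_on
    intro x hx y hy hxy
    have hbx := digitsPos_mem_bound _ x (List.mem_flatMap.mp hx).choose_spec.2
    have hby := digitsPos_mem_bound _ y (List.mem_flatMap.mp hy).choose_spec.2
    have := digitChar_inj_lt x.toNat y.toNat (by omega) (by omega) hxy
    omega

-- ===== VERDICT (by name: the statement is the Claim_ definition above) =====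
theorem has_duplicate_digits_spec : Claim_equal_has_duplicate_digits := by
  intro seq _
  unfold Spec_has_duplicate_digits
  have h := (hddA_iff seq).trans (hddB_iff seq).symm
  cases hA : has_duplicate_digits seq <;> cases hB : has_duplicate_digits_alt seq <;>
    simp [hA, hB] at h ⊢
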